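-- pv_equiv track=rewrite | github.com/ConnortheFan/efficient-power-function | main.py | number_of_multiplications
-- ===== SOURCE A (Python) =====
-- def number_of_multiplications(b):
--   result = 0
--   if b == 2:
--     result += 1
--   elif b % 2 == 0:
--     result += 1
--     result += number_of_multiplications(b//2)
--   elif b % 2 == 1:
--     result += 2
--     result += number_of_multiplications(b//2)
--   return result
-- ===== SOURCE B (Python) =====
-- def number_of_multiplications(b):
--     result = 0
--     while b != 2:
--         result += 1 if b % 2 == 0 else 2
--         b //= 2
--     return result + 1
-- ===== Notes on version B (the rewrite author's own statement) =====
-- stated objective: alternative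
-- what changed: Replaced the non-tail recursion by an explicit while loop with an accumulator (adds 1 or 2 per halving step, plus the final 1 for the b==2 base case).
import Mathlib
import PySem

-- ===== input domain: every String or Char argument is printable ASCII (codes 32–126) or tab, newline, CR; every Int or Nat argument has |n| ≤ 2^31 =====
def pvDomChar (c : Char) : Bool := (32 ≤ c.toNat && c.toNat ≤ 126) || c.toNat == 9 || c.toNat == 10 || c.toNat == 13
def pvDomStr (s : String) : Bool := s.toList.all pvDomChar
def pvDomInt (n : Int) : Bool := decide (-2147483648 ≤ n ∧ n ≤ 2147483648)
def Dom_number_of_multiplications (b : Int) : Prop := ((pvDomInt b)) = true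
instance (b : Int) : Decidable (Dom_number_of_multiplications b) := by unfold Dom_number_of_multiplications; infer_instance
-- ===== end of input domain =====

-- B replaces A's non-tail recursion by an explicit accumulator loop (same step costs, final +1 for the base case); equal on Pre_ (inputs where A terminates).


-- ===== PORT A =====
-- A's recursion does not terminate for every Int, so the port carries a fuel
-- parameter; fuel b.toNat + 1 strictly exceeds the recursion depth on every
-- input admitted by Pre_ (proved below), so the fuel never runs out there.
def nomGoA (fuel : Nat) (b : Int) : Int :=
  match fuel with
  | 0 => 0
  | f + 1 =>
    if b = 2 then 1
    else if PySem.Int.mod b 2 = 0 then 1 + nomGoA f (PySem.Int.floordiv b 2)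
    else if PySem.Int.mod b 2 = 1 then 2 + nomGoA f (PySem.Int.floordiv b 2)
    else 0

def number_of_multiplications (b : Int) : Int := nomGoA (b.toNat + 1) b

-- ===== PORT B =====
-- B's while loop, as a tail-recursive fuelled loop over (b, result).
def nomGoB (fuel : Nat) (b : Int) (result : Int) : Int :=
  match fuel with
  | 0 => result + 1
  | f + 1 =>
    if b ≠ 2 then
      nomGoB f (PySem.Int.floordiv b 2)
        (result + (if PySem.Int.mod b 2 = 0 then 1 else 2))
    else result + 1

def number_of_multiplications_alt (b : Int) : Int := nomGoB (b.toNat + 1) b 0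

-- ===== PRECONDITION & SPEC =====
-- Pre_: exactly the inputs on which A terminates and returns: repeated floor-
-- halving of b reaches 2, i.e. the leading binary digits of b are "10"
-- (equivalently 2^k ≤ b < 3·2^(k-1) with k = log2 b); on every other input
-- A raises RecursionError and B loops forever.
def Pre_number_of_multiplications (b : Int) : Prop :=
  2 ≤ b ∧ b < 3 * 2 ^ (Nat.log 2 b.toNat - 1)
instance (b : Int) : Decidable (Pre_number_of_multiplications b) := by
  unfold Pre_number_of_multiplications; infer_instance

def pvWitness_number_of_multiplications : Int := (4)

def Spec_number_of_multiplications (b : Int) (out : Int) : Prop := out = number_of_multiplications_alt b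
instance (b : Int) (out : Int) : Decidable (Spec_number_of_multiplications b out) := by unfold Spec_number_of_multiplications; infer_instance

-- ===== CLAIM (what is proved, stated in full; the proofs are below) =====
def Claim_equal_number_of_multiplications : Prop := ∀ (b : Int), Dom_number_of_multiplications b → Pre_number_of_multiplications b → Spec_number_of_multiplications b (number_of_multiplications b)

-- ===== LEMMAS AND PROOFS =====

-- Core invariant: if b lies in the band [2·2^n, 3·2^n) and the fuel exceeds n,
-- B's accumulator loop computes acc plus A's recursive value.
theorem nomGoB_eq_nomGoA (n : Nat) : ∀ (fuel : Nat) (b acc : Int), n < fuel →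
    2 * 2 ^ n ≤ b → b < 3 * 2 ^ n → nomGoB fuel b acc = acc + nomGoA fuel b := by
  induction n with
  | zero =>
    intro fuel b acc hf h1 h2
    obtain ⟨f, rfl⟩ := Nat.exists_eq_add_of_lt hf
    have hb : b = 2 := by simp at h1 h2; omega
    subst hb
    simp [nomGoB, nomGoA]
  | succ n ih =>
    intro fuel b acc hf h1 h2
    obtain ⟨f, rfl⟩ := Nat.exists_eq_add_of_lt hf
    have hk : (0:Int) < 2 ^ n := by positivity
    have hb2 : b ≠ 2 := by rw [pow_succ] at h1; nlinarith
    have hmod : PySem.Int.mod b 2 = b % 2 := PySem.Int.mod_eq_emod_of_pos (by norm_num)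
    have hdiv : PySem.Int.floordiv b 2 = b / 2 := PySem.Int.floordiv_eq_ediv_of_pos (by norm_num)
    have h1' : 2 * 2 ^ n ≤ b / 2 := by rw [pow_succ] at h1; omega
    have h2' : b / 2 < 3 * 2 ^ n := by rw [pow_succ] at h2; omega
    have hlt : n < n + 1 + f := by omega
    rcases Int.emod_two_eq_zero_or_one b with hm | hm
    · rw [show n + 1 + f + 1 = (n + 1 + f) + 1 from rfl]
      rw [nomGoB, nomGoA]
      simp only [hb2, hmod, hdiv, hm, ne_eq, not_false_iff, if_true]
      norm_num
      rw [ih (n + 1 + f) (b / 2) (acc + 1) hlt h1' h2']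
      ring
    · rw [show n + 1 + f + 1 = (n + 1 + f) + 1 from rfl]
      rw [nomGoB, nomGoA]
      simp only [hb2, hmod, hdiv, hm, ne_eq, not_false_iff, if_true]
      norm_num
      rw [ih (n + 1 + f) (b / 2) (acc + 2) hlt h1' h2']
      ring

-- ===== VERDICT (by name: the statement is the Claim_ definition above) =====
theorem number_of_multiplications_spec : Claim_equal_number_of_multiplications := by
  intro b _ hpre
  obtain ⟨hb2, h2⟩ := hpre
  unfold Spec_number_of_multiplications number_of_multiplications number_of_multiplications_alt
  set k := Nat.log 2 b.toNat with hk
  have hbt : 2 ≤ b.toNat := by omega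
  have hk1 : 1 ≤ k := Nat.le_log_of_pow_le (by norm_num) (by simpa using hbt)
  have hpow : 2 ^ k ≤ b.toNat := Nat.pow_log_le_self 2 (by omega)
  have h1 : 2 * 2 ^ (k - 1) ≤ b := by
    have : (2:Int) ^ k ≤ b := by
      have := Int.ofNat_le.mpr hpow
      push_cast at this
      omega
    calc (2:Int) * 2 ^ (k - 1) = 2 ^ (k - 1 + 1) := by rw [pow_succ]; ring
    _ = 2 ^ k := by congr 1; omega
    _ ≤ b := this
  have hfuel : k - 1 < b.toNat + 1 := by
    have : k - 1 < 2 ^ (k - 1) := Nat.lt_two_pow_self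
    have h2p : 2 ^ (k - 1) ≤ b.toNat := le_trans (Nat.pow_le_pow_right (by norm_num) (by omega)) hpow
    omega
  rw [nomGoB_eq_nomGoA (k - 1) _ _ 0 hfuel h1 h2]
  ring
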